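-- pv_equiv track=rewrite | github.com/parazyd/amprolla | lib/parse.py | compare_non_epoch
-- ===== SOURCE A (Python) =====
-- def get_non_digit(s):
--     """
--     Get a string and return the longest leading substring consisting exclusively
--     of non-digits (or an empty string), and the remaining substring.
--     """
--     if not s:
--         return "", ""
--     head = ""
--     tail = s
--     N = len(s)
--     i = 0
--     while i < N and not s[i].isdigit():
--         head += s[i]
--         tail = tail[1:]
--         i += 1
--     return head, tail
--
-- def get_digit(s):
--     """
--     Get a string and return the integer value of the longest leading substring
--     consisting exclusively of digit characters (or zero otherwise), and the
--     remaining substring.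
--     """
--     if not s:
--         return 0, ""
--     head = ""
--     tail = s
--     N = len(s)
--     i = 0
--     while i < N and s[i].isdigit():
--         head += s[i]
--         tail = tail[1:]
--         i += 1
--     return int(head), tail
--
-- def char_val(c):
--     """
--     Returns an integer value of a given unicode character. Returns 0 on ~ (since
--     this is in Debian's policy)
--     """
--     if c == '~':
--         return 0
--     elif not c.isalpha():
--         return 256 + ord(c)
--     return ord(c)
--
-- def compare_deb_str(a1, a2):
--     while len(a1) > 0 and len(a2) > 0:
--         char_diff = char_val(a1[0]) - char_val(a2[0])
--         if char_diff != 0: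
--             return char_diff
--         a1 = a1[1:]
--         a2 = a2[1:]
--     if len(a1) == 0:
--         if len(a2) == 0:
--             return 0
--         else:
--             if a2[0] == '~':
--                 return 512
--             else:
--                 return -ord(a2[0])
--     else:
--         if a1[0] == '~':
--             return -512
--         else:
--             return ord(a1[0])
--
-- def compare_non_epoch(s1, s2):
--     cont = True
--     while cont:
--         alpha1, tail1 = get_non_digit(s1)
--         alpha2, tail2 = get_non_digit(s2)
--         if alpha1 == alpha2:
--             if not tail1 and not tail2:
--                 diff = 0
--                 break
--             num1, s1 = get_digit(tail1)
--             num2, s2 = get_digit(tail2)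
--             if num1 == num2:
--                 cont = True
--             else:
--                 diff = num1 - num2
--                 cont = False
--         else:
--             cont = False
--             diff = compare_deb_str(alpha1, alpha2)
--
--     return diff
-- ===== SOURCE B (Python) =====
-- def _char_val(c):
--     if c == '~':
--         return 0
--     elif not c.isalpha():
--         return 256 + ord(c)
--     return ord(c)
--
-- def _tail_val(c):
--     # value attributed to the first extra character of the longer alpha part
--     return -512 if c == '~' else ord(c)
--
-- def _alpha_cmp(a1, a2):
--     for c1, c2 in zip(a1, a2):
--         d = _char_val(c1) - _char_val(c2)
--         if d != 0:
--             return d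
--     if len(a1) == len(a2):
--         return 0
--     if len(a1) > len(a2):
--         return _tail_val(a1[len(a2)])
--     return -_tail_val(a2[len(a1)])
--
-- def _tokenize(s):
--     # one index-based pass: list of (alpha, number) segments
--     toks = []
--     i, n = 0, len(s)
--     while i < n:
--         j = i
--         while j < n and not s[j].isdigit():
--             j += 1
--         alpha = s[i:j]
--         v = 0
--         while j < n and s[j].isdigit():
--             v = v * 10 + (ord(s[j]) - 48)
--             j += 1
--         toks.append((alpha, v))
--         i = j
--     return toks
--
-- def compare_non_epoch(s1, s2):
--     t1 = _tokenize(s1)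
--     t2 = _tokenize(s2)
--     m = max(len(t1), len(t2))
--     for i in range(m):
--         a1, n1 = t1[i] if i < len(t1) else ("", 0)
--         a2, n2 = t2[i] if i < len(t2) else ("", 0)
--         if a1 != a2:
--             return _alpha_cmp(a1, a2)
--         if n1 != n2:
--             return n1 - n2
--     return 0
-- ===== Notes on version B (the rewrite author's own statement) =====
-- stated objective: faster
-- what changed: B replaces A's in-place slicing state machine (re-running get_non_digit/get_digit on shrinking string copies each round, copying the tail on every character) with a single index-based tokenize pass per string producing (alpha, number) segments, followed by a lockstep comparison of the two token lists with missing segments read as ('', 0).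
import Mathlib
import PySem

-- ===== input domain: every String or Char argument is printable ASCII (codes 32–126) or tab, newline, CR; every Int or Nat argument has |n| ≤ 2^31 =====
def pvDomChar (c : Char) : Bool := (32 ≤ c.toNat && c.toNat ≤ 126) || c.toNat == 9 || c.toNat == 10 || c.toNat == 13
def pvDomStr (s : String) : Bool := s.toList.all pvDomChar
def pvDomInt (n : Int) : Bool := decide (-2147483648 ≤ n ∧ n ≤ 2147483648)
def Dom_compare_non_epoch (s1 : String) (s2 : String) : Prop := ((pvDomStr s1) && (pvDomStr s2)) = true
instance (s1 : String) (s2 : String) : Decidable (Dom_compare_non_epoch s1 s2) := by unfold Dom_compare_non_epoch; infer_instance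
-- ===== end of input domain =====

-- B restructures A's in-place slicing state machine into a single tokenize pass per string
-- followed by a lockstep comparison of the two token lists (objective: alternative decomposition).
-- Char.isDigit / Char.isAlpha are exact for Python's isdigit/isalpha on the ASCII domain Dom.

-- ===== PORT A =====
-- char_val (shared by both Pythons verbatim)
def pvCharVal (c : Char) : Int :=
  if c = '~' then 0
  else if ¬ c.isAlpha then 256 + (c.toNat : Int)
  else (c.toNat : Int)

-- int(head) on a digit-only string (exact there; both Pythons compute this value)
def pvDigitsVal (ds : List Char) : Int :=
  ds.foldl (fun a c => 10 * a + ((c.toNat : Int) - 48)) 0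

-- get_non_digit: the while loop building head char by char, tail = remaining suffix
def pvGnd : List Char → List Char × List Char
  | [] => ([], [])
  | c :: rest =>
      if c.isDigit then ([], c :: rest)
      else
        let p := pvGnd rest
        (c :: p.1, p.2)

-- get_digit's while loop collecting the leading digit run
def pvGdLoop : List Char → List Char × List Char
  | [] => ([], [])
  | c :: rest =>
      if c.isDigit then
        let p := pvGdLoop rest
        (c :: p.1, p.2)
      else ([], c :: rest)

-- get_digit; Python's int("") ValueError is unreachable from compare_non_epoch
-- (the argument is empty or starts with a digit), so the value is pvDigitsVal of the run
def pvGd (s : List Char) : Int × List Char :=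
  ((pvDigitsVal (pvGdLoop s).1), (pvGdLoop s).2)

-- compare_deb_str: while both nonempty compare char_vals, then the tail sentinels
def pvCds : List Char → List Char → Int
  | c1 :: r1, c2 :: r2 =>
      if pvCharVal c1 - pvCharVal c2 ≠ 0 then pvCharVal c1 - pvCharVal c2
      else pvCds r1 r2
  | [], [] => 0
  | [], c2 :: _ => if c2 = '~' then 512 else -(c2.toNat : Int)
  | c1 :: _, [] => if c1 = '~' then -512 else (c1.toNat : Int)

-- termination facts for A's while loop (each iteration consumes from a nonempty string)
theorem pvGnd_snd_len_le : ∀ s : List Char, (pvGnd s).2.length ≤ s.length := by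
  intro s; induction s with
  | nil => simp [pvGnd]
  | cons c rest ih => by_cases h : c.isDigit <;> (simp [pvGnd, h]; try omega)

theorem pvGdLoop_snd_len_le : ∀ s : List Char, (pvGdLoop s).2.length ≤ s.length := by
  intro s; induction s with
  | nil => simp [pvGdLoop]
  | cons c rest ih => by_cases h : c.isDigit <;> (simp [pvGdLoop, h]; try omega)

theorem pvConsume_le (s : List Char) : (pvGd (pvGnd s).2).2.length ≤ s.length := by
  have h1 := pvGnd_snd_len_le s
  have h2 := pvGdLoop_snd_len_le (pvGnd s).2
  simp [pvGd] at *; omega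

theorem pvConsume_lt : ∀ s : List Char, s ≠ [] → (pvGd (pvGnd s).2).2.length < s.length := by
  intro s hs
  cases s with
  | nil => exact absurd rfl hs
  | cons c rest =>
      by_cases h : c.isDigit
      · have h2 := pvGdLoop_snd_len_le rest
        simp [pvGnd, pvGd, pvGdLoop, h]; omega
      · have h2 := pvConsume_le rest
        simp [pvGnd, pvGd, h] at *; omega

theorem pvGnd_nil_snd : (pvGnd []).2 = [] := rfl

-- the main while loop of compare_non_epoch (re-slicing the remaining strings each round)
def pvCneList (s1 s2 : List Char) : Int :=
  let a1 := (pvGnd s1).1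
  let t1 := (pvGnd s1).2
  let a2 := (pvGnd s2).1
  let t2 := (pvGnd s2).2
  if a1 = a2 then
    if t1 = [] ∧ t2 = [] then 0
    else
      let n1 := (pvGd t1).1
      let n2 := (pvGd t2).1
      if n1 = n2 then pvCneList (pvGd t1).2 (pvGd t2).2
      else n1 - n2
  else pvCds a1 a2
termination_by s1.length + s2.length
decreasing_by
  have hne : (pvGnd s1).2 ≠ [] ∨ (pvGnd s2).2 ≠ [] := by tauto
  have hlt : s1 ≠ [] ∨ s2 ≠ [] := by
    rcases hne with h | h
    · left; intro he; subst he; exact h pvGnd_nil_snd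
    · right; intro he; subst he; exact h pvGnd_nil_snd
  have l1 := pvConsume_le s1
  have l2 := pvConsume_le s2
  rcases hlt with h | h
  · have := pvConsume_lt s1 h; omega
  · have := pvConsume_lt s2 h; omega

def compare_non_epoch (s1 : String) (s2 : String) : Int :=
  pvCneList s1.toList s2.toList

-- ===== PORT B =====
-- _tail_val
def pvTailVal (c : Char) : Int := if c = '~' then -512 else (c.toNat : Int)

-- _alpha_cmp: zip loop of char_val diffs, then the length comparison
def pvAlphaCmp : List Char → List Char → Int
  | c1 :: r1, c2 :: r2 =>
      let d := pvCharVal c1 - pvCharVal c2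
      if d ≠ 0 then d else pvAlphaCmp r1 r2
  | [], [] => 0
  | c1 :: _, [] => pvTailVal c1
  | [], c2 :: _ => -(pvTailVal c2)

-- _tokenize: one pass; alpha = run of non-digits, value accumulated over the digit run
def pvTok : List Char → List (List Char × Int)
  | [] => []
  | c :: rest =>
      let s := c :: rest
      let a := s.takeWhile (fun x => !x.isDigit)
      let t := s.dropWhile (fun x => !x.isDigit)
      (a, pvDigitsVal (t.takeWhile (·.isDigit))) :: pvTok (t.dropWhile (·.isDigit))
termination_by s => s.length
decreasing_by
  by_cases h : c.isDigit
  · simp [List.dropWhile, h]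
    have := List.length_dropWhile_le (fun x : Char => x.isDigit) rest
    omega
  · simp [List.dropWhile, h]
    have h1 := List.length_dropWhile_le (fun x : Char => !x.isDigit) rest
    have h2 := List.length_dropWhile_le (fun x : Char => x.isDigit)
      (rest.dropWhile (fun x => !x.isDigit))
    omega

-- the lockstep comparison loop, a missing token read as ("", 0)
def pvCmpToks : List (List Char × Int) → List (List Char × Int) → Int
  | [], [] => 0
  | [], (a2, n2) :: r2 =>
      if ([] : List Char) = a2 then
        if (0 : Int) = n2 then pvCmpToks [] r2 else 0 - n2
      else pvAlphaCmp [] a2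
  | (a1, n1) :: r1, [] =>
      if a1 = ([] : List Char) then
        if n1 = (0 : Int) then pvCmpToks r1 [] else n1 - 0
      else pvAlphaCmp a1 []
  | (a1, n1) :: r1, (a2, n2) :: r2 =>
      if a1 = a2 then
        if n1 = n2 then pvCmpToks r1 r2 else n1 - n2
      else pvAlphaCmp a1 a2
termination_by t1 t2 => t1.length + t2.length

def compare_non_epoch_alt (s1 : String) (s2 : String) : Int :=
  pvCmpToks (pvTok s1.toList) (pvTok s2.toList)

-- ===== PRECONDITION & SPEC =====
def Spec_compare_non_epoch (s1 : String) (s2 : String) (out : Int) : Prop := out = compare_non_epoch_alt s1 s2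
instance (s1 : String) (s2 : String) (out : Int) : Decidable (Spec_compare_non_epoch s1 s2 out) := by unfold Spec_compare_non_epoch; infer_instance

-- ===== CLAIM (what is proved, stated in full; the proofs are below) =====
def Claim_equal_compare_non_epoch : Prop := ∀ (s1 : String) (s2 : String), Dom_compare_non_epoch s1 s2 → Spec_compare_non_epoch s1 s2 (compare_non_epoch s1 s2)

-- ===== LEMMAS AND PROOFS =====

theorem pvAlphaCmp_eq_pvCds : ∀ a1 a2 : List Char, pvAlphaCmp a1 a2 = pvCds a1 a2 := by
  intro a1
  induction a1 with
  | nil => intro a2; cases a2 with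
    | nil => rfl
    | cons c2 r2 => simp [pvAlphaCmp, pvCds, pvTailVal]; split <;> simp
  | cons c1 r1 ih =>
      intro a2; cases a2 with
      | nil => simp [pvAlphaCmp, pvCds, pvTailVal]
      | cons c2 r2 =>
          simp only [pvAlphaCmp, pvCds]
          split <;> simp_all

theorem pvGnd_eq_span (s : List Char) :
    pvGnd s = (s.takeWhile (fun x => !x.isDigit), s.dropWhile (fun x => !x.isDigit)) := by
  induction s with
  | nil => rfl
  | cons c rest ih =>
      by_cases h : c.isDigit <;> simp [pvGnd, List.takeWhile, List.dropWhile, h, ih]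

theorem pvGdLoop_eq_span (s : List Char) :
    pvGdLoop s = (s.takeWhile (·.isDigit), s.dropWhile (·.isDigit)) := by
  induction s with
  | nil => rfl
  | cons c rest ih =>
      by_cases h : c.isDigit <;> simp [pvGdLoop, List.takeWhile, List.dropWhile, h, ih]

-- tokenization as one step of A's decomposition
theorem pvTok_eq_step (s : List Char) (hs : s ≠ []) :
    pvTok s = ((pvGnd s).1, (pvGd (pvGnd s).2).1) :: pvTok ((pvGd (pvGnd s).2).2) := by
  cases s with
  | nil => exact absurd rfl hs
  | cons c rest =>
      rw [pvTok]
      simp [pvGnd_eq_span, pvGd, pvGdLoop_eq_span]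

theorem pvTok_nil : pvTok [] = [] := by rw [pvTok]

theorem pvGnd_nil : pvGnd [] = ([], []) := rfl
theorem pvGd_nil : pvGd [] = (0, []) := rfl

-- snd of pvGnd is [] only when applied to []… rather: t ≠ [] → s ≠ []
theorem pvGnd_snd_ne_nil {s : List Char} (h : (pvGnd s).2 ≠ []) : s ≠ [] := by
  intro he; subst he; exact h rfl

theorem pvCneList_eq_cmpToks : ∀ s1 s2 : List Char,
    pvCneList s1 s2 = pvCmpToks (pvTok s1) (pvTok s2) := by
  intro s1 s2
  generalize hn : s1.length + s2.length = n
  induction n using Nat.strong_induction_on generalizing s1 s2 with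
  | _ n ih =>
  rw [pvCneList]
  by_cases hb : s1 = [] ∧ s2 = []
  · obtain ⟨h1, h2⟩ := hb; subst h1; subst h2
    simp [pvGnd_nil, pvTok_nil, pvCmpToks]
  -- one token on each side turns the RHS into one round of A's loop
  have hstep : pvCmpToks (pvTok s1) (pvTok s2) =
      (if (pvGnd s1).1 = (pvGnd s2).1 then
        (if (pvGd (pvGnd s1).2).1 = (pvGd (pvGnd s2).2).1 then
          pvCmpToks (pvTok (pvGd (pvGnd s1).2).2) (pvTok (pvGd (pvGnd s2).2).2)
         else (pvGd (pvGnd s1).2).1 - (pvGd (pvGnd s2).2).1)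
       else pvAlphaCmp (pvGnd s1).1 (pvGnd s2).1) := by
    by_cases h1 : s1 = []
    · have h2 : s2 ≠ [] := by tauto
      subst h1
      rw [pvTok_eq_step s2 h2, pvTok_nil]
      simp only [pvCmpToks, pvGnd_nil, pvGd_nil, pvTok_nil]
    · by_cases h2 : s2 = []
      · subst h2
        rw [pvTok_eq_step s1 h1, pvTok_nil]
        simp only [pvCmpToks, pvGnd_nil, pvGd_nil, pvTok_nil]
      · rw [pvTok_eq_step s1 h1, pvTok_eq_step s2 h2]
        simp only [pvCmpToks]
  rw [hstep]
  by_cases hA : (pvGnd s1).1 = (pvGnd s2).1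
  · rw [if_pos hA, if_pos hA]
    by_cases hT : (pvGnd s1).2 = [] ∧ (pvGnd s2).2 = []
    · obtain ⟨e1, e2⟩ := hT
      rw [if_pos (And.intro e1 e2), e1, e2]
      simp [pvGd_nil, pvTok_nil, pvCmpToks]
    · rw [if_neg hT]
      by_cases hN : (pvGd (pvGnd s1).2).1 = (pvGd (pvGnd s2).2).1
      · rw [if_pos hN, if_pos hN]
        have hlt : (pvGd (pvGnd s1).2).2.length + (pvGd (pvGnd s2).2).2.length < n := by
          have l1 := pvConsume_le s1
          have l2 := pvConsume_le s2
          have hne : (pvGnd s1).2 ≠ [] ∨ (pvGnd s2).2 ≠ [] := by tauto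
          rcases hne with h | h
          · have := pvConsume_lt s1 (pvGnd_snd_ne_nil h); omega
          · have := pvConsume_lt s2 (pvGnd_snd_ne_nil h); omega
        exact ih _ hlt _ _ rfl
      · rw [if_neg hN, if_neg hN]
  · rw [if_neg hA, if_neg hA, pvAlphaCmp_eq_pvCds]

-- ===== VERDICT (by name: the statement is the Claim_ definition above) =====
theorem compare_non_epoch_spec : Claim_equal_compare_non_epoch := by
  intro s1 s2 _
  unfold Spec_compare_non_epoch compare_non_epoch compare_non_epoch_alt
  exact pvCneList_eq_cmpToks s1.toList s2.toList
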